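-- pv_equiv track=rewrite | github.com/Rohan-Yelandur/robosuite-scene-generation | Robo-MD-RSS.github.io/analyze_failures.py | create_short_labels
-- ===== SOURCE A (Python) =====
-- def create_short_labels(action_dict, action_list):
--     """Create concise labels for visualization"""
--     label_map = {}
--
--     for action_id in action_list:
--         description = action_dict.get(action_id, f"Action {action_id}")
--
--         # Create short labels based on common patterns
--         if "cylinder color to" in description.lower():
--             color = description.split("to")[-1].strip().rstrip(".")
--             label_map[action_id] = f"Cyl {color.capitalize()}"
--         elif "cube color to" in description.lower():
--             color = description.split("to")[-1].strip().rstrip(".")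
--             label_map[action_id] = f"Cube {color.capitalize()}"
--         elif "can color to" in description.lower():
--             color = description.split("to")[-1].strip().rstrip(".")
--             label_map[action_id] = f"Can {color.capitalize()}"
--         elif "table color to" in description.lower():
--             color = description.split("to")[-1].strip().rstrip(".")
--             label_map[action_id] = f"Table {color.capitalize()}"
--         elif "robot color to" in description.lower():
--             color = description.split("to")[-1].strip().rstrip(".")
--             label_map[action_id] = f"Robot {color.capitalize()}"
--         elif "lighting color to" in description.lower():
--             color = description.split("to")[-1].strip().rstrip(".")
--             label_map[action_id] = f"Light {color.capitalize()}"
--         elif "resize" in description.lower() and "cylinder" in description.lower():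
--             label_map[action_id] = f"Cyl Size {action_id}"
--         elif "resize" in description.lower() and "cube" in description.lower():
--             label_map[action_id] = f"Cube Size {action_id}"
--         elif "resize" in description.lower() and "table" in description.lower():
--             label_map[action_id] = f"Table Size {action_id}"
--         elif "resize" in description.lower() and "box" in description.lower():
--             label_map[action_id] = f"Box Size {action_id}"
--         elif "no perturbation" in description.lower():
--             label_map[action_id] = "No Change"
--         else:
--             # Truncate long descriptions
--             words = description.split()
--             if len(words) > 3:
--                 label_map[action_id] = " ".join(words[:3]) + "..."
--             else:
--                 label_map[action_id] = description[:20]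
--
--     return label_map
-- ===== SOURCE B (Python) =====
-- # Staged whole-list rewriting instead of A's per-item first-match if/elif chain:
-- # every id first gets the base truncation label, then overwriting passes apply
-- # the rules in REVERSE precedence order, so the last write wins = A's first match.
-- RESIZE_REV = [("box", "Box"), ("table", "Table"), ("cube", "Cube"), ("cylinder", "Cyl")]
-- COLOR_REV = [
--     ("lighting color to", "Light"),
--     ("robot color to", "Robot"),
--     ("table color to", "Table"),
--     ("can color to", "Can"),
--     ("cube color to", "Cube"),
--     ("cylinder color to", "Cyl"),
-- ]
--
--
-- def create_short_labels(action_dict, action_list):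
--     ids = list(dict.fromkeys(action_list))
--     descs = [action_dict.get(a, f"Action {a}") for a in ids]
--     # base pass: truncation label for every action
--     labels = [" ".join(d.split()[:3]) + "..." if len(d.split()) > 3 else d[:20]
--               for d in descs]
--     # overwrite pass: "no perturbation"
--     labels = ["No Change" if "no perturbation" in d.lower() else l
--               for d, l in zip(descs, labels)]
--     # overwrite passes: resize rules, lowest precedence first
--     for kw, pre in RESIZE_REV:
--         labels = [f"{pre} Size {a}" if "resize" in d.lower() and kw in d.lower() else l
--                   for (a, d), l in zip(zip(ids, descs), labels)]
--     # overwrite passes: color rules, lowest precedence first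
--     for kw, pre in COLOR_REV:
--         labels = [f"{pre} {d.split('to')[-1].strip().rstrip('.').capitalize()}" if kw in d.lower() else l
--                   for d, l in zip(descs, labels)]
--     return dict(zip(ids, labels))
-- ===== Notes on version B (the rewrite author's own statement) =====
-- stated objective: alternative
-- what changed: A labels each id in one pass with a first-match if/elif chain; B instead rewrites whole parallel lists in stages: every id gets the base truncation label, then overwriting passes apply the no-perturbation, resize and color rules in reverse precedence order so the last write wins, which equals A's first match.
import Mathlib
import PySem

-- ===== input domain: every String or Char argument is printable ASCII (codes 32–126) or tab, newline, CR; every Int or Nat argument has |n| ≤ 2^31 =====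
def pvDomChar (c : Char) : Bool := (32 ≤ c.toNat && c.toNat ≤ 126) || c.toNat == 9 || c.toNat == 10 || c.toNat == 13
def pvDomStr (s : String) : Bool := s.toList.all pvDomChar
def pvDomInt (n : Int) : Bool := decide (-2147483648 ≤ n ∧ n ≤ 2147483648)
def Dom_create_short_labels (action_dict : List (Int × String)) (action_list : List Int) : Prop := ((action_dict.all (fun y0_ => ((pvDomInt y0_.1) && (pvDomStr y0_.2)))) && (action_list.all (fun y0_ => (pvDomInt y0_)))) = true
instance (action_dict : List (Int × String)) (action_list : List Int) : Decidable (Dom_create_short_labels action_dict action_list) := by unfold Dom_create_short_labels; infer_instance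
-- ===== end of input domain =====

-- B replaces A's one-pass first-match if/elif chain by staged whole-list rewriting:
-- a base truncation label for every id, then overwriting passes applying the rules
-- in reverse precedence order (last write wins); objective: alternative.

-- shared string primitives PySem does not provide (hand ports, exact on the ASCII domain):
-- s.capitalize(): first char uppercased, the rest lowercased ("" stays "")
def pyCapitalize (s : String) : String :=
  match s.toList with
  | [] => ""
  | c :: rest => String.ofList (PySem.Chars.upperChar c :: PySem.Chars.lower rest)

-- s.rstrip("."): drop trailing '.' characters
def pyRstripDot (s : String) : String :=
  String.ofList ((s.toList.reverse.dropWhile (· == '.')).reverse)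

-- description.split("to")[-1]: sep "to" ≠ "" so split? is some, and a split result
-- is never empty so pyGet? (-1) is some — the getD defaults are unreachable
def pySplitToLast (s : String) : String :=
  (PySem.List.pyGet? ((PySem.Str.split? s "to").getD [s]) (-1)).getD ""

-- ===== PORT A =====
def create_short_labels (action_dict : List (Int × String)) (action_list : List Int) : List (Int × String) :=
  (action_list.foldl (fun label_map action_id =>
    let description := ((PySem.Dict.mk action_dict).get? action_id).getD ("Action " ++ PySem.Int.toStr action_id)
    if PySem.Str.isIn "cylinder color to" (PySem.Str.lower description) then
      let color := pyRstripDot (PySem.Str.strip (pySplitToLast description))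
      label_map.insert action_id ("Cyl " ++ pyCapitalize color)
    else if PySem.Str.isIn "cube color to" (PySem.Str.lower description) then
      let color := pyRstripDot (PySem.Str.strip (pySplitToLast description))
      label_map.insert action_id ("Cube " ++ pyCapitalize color)
    else if PySem.Str.isIn "can color to" (PySem.Str.lower description) then
      let color := pyRstripDot (PySem.Str.strip (pySplitToLast description))
      label_map.insert action_id ("Can " ++ pyCapitalize color)
    else if PySem.Str.isIn "table color to" (PySem.Str.lower description) then
      let color := pyRstripDot (PySem.Str.strip (pySplitToLast description))
      label_map.insert action_id ("Table " ++ pyCapitalize color)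
    else if PySem.Str.isIn "robot color to" (PySem.Str.lower description) then
      let color := pyRstripDot (PySem.Str.strip (pySplitToLast description))
      label_map.insert action_id ("Robot " ++ pyCapitalize color)
    else if PySem.Str.isIn "lighting color to" (PySem.Str.lower description) then
      let color := pyRstripDot (PySem.Str.strip (pySplitToLast description))
      label_map.insert action_id ("Light " ++ pyCapitalize color)
    else if PySem.Str.isIn "resize" (PySem.Str.lower description) && PySem.Str.isIn "cylinder" (PySem.Str.lower description) then
      label_map.insert action_id ("Cyl Size " ++ PySem.Int.toStr action_id)
    else if PySem.Str.isIn "resize" (PySem.Str.lower description) && PySem.Str.isIn "cube" (PySem.Str.lower description) then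
      label_map.insert action_id ("Cube Size " ++ PySem.Int.toStr action_id)
    else if PySem.Str.isIn "resize" (PySem.Str.lower description) && PySem.Str.isIn "table" (PySem.Str.lower description) then
      label_map.insert action_id ("Table Size " ++ PySem.Int.toStr action_id)
    else if PySem.Str.isIn "resize" (PySem.Str.lower description) && PySem.Str.isIn "box" (PySem.Str.lower description) then
      label_map.insert action_id ("Box Size " ++ PySem.Int.toStr action_id)
    else if PySem.Str.isIn "no perturbation" (PySem.Str.lower description) then
      label_map.insert action_id "No Change"
    else
      let words := PySem.Str.split₀ description
      if words.length > 3 then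
        label_map.insert action_id (PySem.Str.join " " (PySem.List.slice words none (some 3)) ++ "...")
      else
        label_map.insert action_id (PySem.Str.slice description none (some 20))
    ) PySem.Dict.empty).items

-- ===== PORT B =====
def pvResizeRev : List (String × String) :=
  [("box", "Box"), ("table", "Table"), ("cube", "Cube"), ("cylinder", "Cyl")]

def pvColorRev : List (String × String) :=
  [("lighting color to", "Light"), ("robot color to", "Robot"), ("table color to", "Table"),
   ("can color to", "Can"), ("cube color to", "Cube"), ("cylinder color to", "Cyl")]

def create_short_labels_alt (action_dict : List (Int × String)) (action_list : List Int) : List (Int × String) :=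
  let ids := PySem.List.dedup action_list
  let descs := ids.map (fun a => ((PySem.Dict.mk action_dict).get? a).getD ("Action " ++ PySem.Int.toStr a))
  -- base pass: truncation label for every action
  let labels0 := descs.map (fun d =>
    if (PySem.Str.split₀ d).length > 3 then
      PySem.Str.join " " (PySem.List.slice (PySem.Str.split₀ d) none (some 3)) ++ "..."
    else PySem.Str.slice d none (some 20))
  -- overwrite pass: "no perturbation"
  let labels1 := (descs.zip labels0).map (fun p =>
    if PySem.Str.isIn "no perturbation" (PySem.Str.lower p.1) then "No Change" else p.2)
  -- overwrite passes: resize rules, lowest precedence first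
  let labels2 := pvResizeRev.foldl (fun ls r =>
    ((ids.zip descs).zip ls).map (fun q =>
      if PySem.Str.isIn "resize" (PySem.Str.lower q.1.2) && PySem.Str.isIn r.1 (PySem.Str.lower q.1.2) then
        r.2 ++ " Size " ++ PySem.Int.toStr q.1.1
      else q.2)) labels1
  -- overwrite passes: color rules, lowest precedence first
  let labels3 := pvColorRev.foldl (fun ls r =>
    (descs.zip ls).map (fun q =>
      if PySem.Str.isIn r.1 (PySem.Str.lower q.1) then
        r.2 ++ " " ++ pyCapitalize (pyRstripDot (PySem.Str.strip (pySplitToLast q.1)))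
      else q.2)) labels2
  -- dict(zip(ids, labels)): ids are distinct, so the dict is exactly this assoc list
  ids.zip labels3

-- ===== PRECONDITION & SPEC =====
def Spec_create_short_labels (action_dict : List (Int × String)) (action_list : List Int) (out : List (Int × String)) : Prop := out = create_short_labels_alt action_dict action_list
instance (action_dict : List (Int × String)) (action_list : List Int) (out : List (Int × String)) : Decidable (Spec_create_short_labels action_dict action_list out) := by unfold Spec_create_short_labels; infer_instance

-- ===== CLAIM (what is proved, stated in full; the proofs are below) =====
def Claim_equal_create_short_labels : Prop := ∀ (action_dict : List (Int × String)) (action_list : List Int), Dom_create_short_labels action_dict action_list → Spec_create_short_labels action_dict action_list (create_short_labels action_dict action_list)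

-- ===== LEMMAS AND PROOFS =====

-- description looked up for an id
def pvDesc (action_dict : List (Int × String)) (a : Int) : String :=
  ((PySem.Dict.mk action_dict).get? a).getD ("Action " ++ PySem.Int.toStr a)

-- A's per-item chain, as a function of id and description
def pvChain (aid : Int) (d : String) : String :=
  if PySem.Str.isIn "cylinder color to" (PySem.Str.lower d) then
    "Cyl " ++ pyCapitalize (pyRstripDot (PySem.Str.strip (pySplitToLast d)))
  else if PySem.Str.isIn "cube color to" (PySem.Str.lower d) then
    "Cube " ++ pyCapitalize (pyRstripDot (PySem.Str.strip (pySplitToLast d)))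
  else if PySem.Str.isIn "can color to" (PySem.Str.lower d) then
    "Can " ++ pyCapitalize (pyRstripDot (PySem.Str.strip (pySplitToLast d)))
  else if PySem.Str.isIn "table color to" (PySem.Str.lower d) then
    "Table " ++ pyCapitalize (pyRstripDot (PySem.Str.strip (pySplitToLast d)))
  else if PySem.Str.isIn "robot color to" (PySem.Str.lower d) then
    "Robot " ++ pyCapitalize (pyRstripDot (PySem.Str.strip (pySplitToLast d)))
  else if PySem.Str.isIn "lighting color to" (PySem.Str.lower d) then
    "Light " ++ pyCapitalize (pyRstripDot (PySem.Str.strip (pySplitToLast d)))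
  else if PySem.Str.isIn "resize" (PySem.Str.lower d) && PySem.Str.isIn "cylinder" (PySem.Str.lower d) then
    "Cyl Size " ++ PySem.Int.toStr aid
  else if PySem.Str.isIn "resize" (PySem.Str.lower d) && PySem.Str.isIn "cube" (PySem.Str.lower d) then
    "Cube Size " ++ PySem.Int.toStr aid
  else if PySem.Str.isIn "resize" (PySem.Str.lower d) && PySem.Str.isIn "table" (PySem.Str.lower d) then
    "Table Size " ++ PySem.Int.toStr aid
  else if PySem.Str.isIn "resize" (PySem.Str.lower d) && PySem.Str.isIn "box" (PySem.Str.lower d) then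
    "Box Size " ++ PySem.Int.toStr aid
  else if PySem.Str.isIn "no perturbation" (PySem.Str.lower d) then
    "No Change"
  else if (PySem.Str.split₀ d).length > 3 then
    PySem.Str.join " " (PySem.List.slice (PySem.Str.split₀ d) none (some 3)) ++ "..."
  else PySem.Str.slice d none (some 20)

-- B's per-item staged value, after commuting the maps past the zips
def pvStaged (aid : Int) (d : String) : String :=
  pvColorRev.foldl (fun l r =>
    if PySem.Str.isIn r.1 (PySem.Str.lower d) then
      r.2 ++ " " ++ pyCapitalize (pyRstripDot (PySem.Str.strip (pySplitToLast d)))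
    else l)
    (pvResizeRev.foldl (fun l r =>
      if PySem.Str.isIn "resize" (PySem.Str.lower d) && PySem.Str.isIn r.1 (PySem.Str.lower d) then
        r.2 ++ " Size " ++ PySem.Int.toStr aid
      else l)
      (if PySem.Str.isIn "no perturbation" (PySem.Str.lower d) then "No Change"
       else if (PySem.Str.split₀ d).length > 3 then
         PySem.Str.join " " (PySem.List.slice (PySem.Str.split₀ d) none (some 3)) ++ "..."
       else PySem.Str.slice d none (some 20)))

-- last-write-wins over the reversed rule tables = first match of A's chain
set_option maxHeartbeats 4000000 in
theorem staged_eq_chain (aid : Int) (d : String) : pvStaged aid d = pvChain aid d := by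
  unfold pvStaged pvChain pvResizeRev pvColorRev
  simp only [List.foldl_cons, List.foldl_nil]
  cases h1 : PySem.Str.isIn "cylinder color to" (PySem.Str.lower d) with
  | true => rfl
  | false =>
  cases h2 : PySem.Str.isIn "cube color to" (PySem.Str.lower d) with
  | true => rfl
  | false =>
  cases h3 : PySem.Str.isIn "can color to" (PySem.Str.lower d) with
  | true => rfl
  | false =>
  cases h4 : PySem.Str.isIn "table color to" (PySem.Str.lower d) with
  | true => rfl
  | false =>
  cases h5 : PySem.Str.isIn "robot color to" (PySem.Str.lower d) with
  | true => rfl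
  | false =>
  cases h6 : PySem.Str.isIn "lighting color to" (PySem.Str.lower d) with
  | true => rfl
  | false =>
  cases h7 : PySem.Str.isIn "resize" (PySem.Str.lower d) && PySem.Str.isIn "cylinder" (PySem.Str.lower d) with
  | true => rfl
  | false =>
  cases h8 : PySem.Str.isIn "resize" (PySem.Str.lower d) && PySem.Str.isIn "cube" (PySem.Str.lower d) with
  | true => rfl
  | false =>
  cases h9 : PySem.Str.isIn "resize" (PySem.Str.lower d) && PySem.Str.isIn "table" (PySem.Str.lower d) with
  | true => rfl
  | false =>
  cases h10 : PySem.Str.isIn "resize" (PySem.Str.lower d) && PySem.Str.isIn "box" (PySem.Str.lower d) with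
  | true => rfl
  | false =>
  cases h11 : PySem.Str.isIn "no perturbation" (PySem.Str.lower d) with
  | true => rfl
  | false =>
  by_cases hw : (PySem.Str.split₀ d).length > 3
  · simp only [if_pos hw]; rfl
  · simp only [if_neg hw]; rfl

-- A's step body equals inserting pvChain
theorem chain_step (m : PySem.Dict Int String) (aid : Int) (d : String) :
    (if PySem.Str.isIn "cylinder color to" (PySem.Str.lower d) then
      m.insert aid ("Cyl " ++ pyCapitalize (pyRstripDot (PySem.Str.strip (pySplitToLast d))))
    else if PySem.Str.isIn "cube color to" (PySem.Str.lower d) then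
      m.insert aid ("Cube " ++ pyCapitalize (pyRstripDot (PySem.Str.strip (pySplitToLast d))))
    else if PySem.Str.isIn "can color to" (PySem.Str.lower d) then
      m.insert aid ("Can " ++ pyCapitalize (pyRstripDot (PySem.Str.strip (pySplitToLast d))))
    else if PySem.Str.isIn "table color to" (PySem.Str.lower d) then
      m.insert aid ("Table " ++ pyCapitalize (pyRstripDot (PySem.Str.strip (pySplitToLast d))))
    else if PySem.Str.isIn "robot color to" (PySem.Str.lower d) then
      m.insert aid ("Robot " ++ pyCapitalize (pyRstripDot (PySem.Str.strip (pySplitToLast d))))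
    else if PySem.Str.isIn "lighting color to" (PySem.Str.lower d) then
      m.insert aid ("Light " ++ pyCapitalize (pyRstripDot (PySem.Str.strip (pySplitToLast d))))
    else if PySem.Str.isIn "resize" (PySem.Str.lower d) && PySem.Str.isIn "cylinder" (PySem.Str.lower d) then
      m.insert aid ("Cyl Size " ++ PySem.Int.toStr aid)
    else if PySem.Str.isIn "resize" (PySem.Str.lower d) && PySem.Str.isIn "cube" (PySem.Str.lower d) then
      m.insert aid ("Cube Size " ++ PySem.Int.toStr aid)
    else if PySem.Str.isIn "resize" (PySem.Str.lower d) && PySem.Str.isIn "table" (PySem.Str.lower d) then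
      m.insert aid ("Table Size " ++ PySem.Int.toStr aid)
    else if PySem.Str.isIn "resize" (PySem.Str.lower d) && PySem.Str.isIn "box" (PySem.Str.lower d) then
      m.insert aid ("Box Size " ++ PySem.Int.toStr aid)
    else if PySem.Str.isIn "no perturbation" (PySem.Str.lower d) then
      m.insert aid "No Change"
    else
      let words := PySem.Str.split₀ d
      if words.length > 3 then
        m.insert aid (PySem.Str.join " " (PySem.List.slice words none (some 3)) ++ "...")
      else
        m.insert aid (PySem.Str.slice d none (some 20)))
    = m.insert aid (pvChain aid d) := by
  unfold pvChain
  simp only [apply_ite (m.insert aid)]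

theorem fold_items_eq (f : Int → String) (l : List Int) :
    ∀ (s : List Int) (d : PySem.Dict Int String),
      d.items = s.map (fun a => (a, f a)) → s.Nodup →
      (l.foldl (fun d a => d.insert a (f a)) d).items
        = (l.foldl PySem.Set.add s).map (fun a => (a, f a)) := by
  induction l with
  | nil => intro s d h _; simpa using h
  | cons a l ih =>
    intro s d h hnd
    simp only [List.foldl_cons]
    have hkeys : d.keys = s := by
      simp only [PySem.Dict.keys, h, List.map_map]
      have hid : ((fun x : Int × String => x.1) ∘ fun a : Int => (a, f a)) = fun a => a := rfl
      rw [hid]; exact List.map_id' s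
    by_cases hmem : a ∈ s
    · have hc : d.contains a = true := by
        rw [PySem.Dict.contains_iff_mem_keys, hkeys]; exact hmem
      have hadd : PySem.Set.add s a = s := by
        rw [PySem.Set.add, if_pos ((PySem.Set.contains_iff s a).mpr hmem)]
      rw [hadd]
      apply ih s _ _ hnd
      rw [PySem.Dict.items_insert_of_contains d (f a) hc, h, List.map_map]
      apply List.map_congr_left
      intro x _
      by_cases hx : x = a <;> simp [hx]
    · have hc : d.contains a = false := by
        rw [Bool.eq_false_iff]
        intro hcon
        rw [PySem.Dict.contains_iff_mem_keys, hkeys] at hcon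
        exact hmem hcon
      have hscon : PySem.Set.contains s a = false := by
        rw [Bool.eq_false_iff]
        intro hcon
        exact hmem ((PySem.Set.contains_iff s a).mp hcon)
      have hadd : PySem.Set.add s a = s ++ [a] := by
        rw [PySem.Set.add, if_neg (by rw [hscon]; simp)]
      rw [hadd]
      apply ih (s ++ [a])
      · rw [PySem.Dict.items_insert_of_not_contains d (f a) hc, h]; simp
      · exact List.Nodup.append hnd (List.nodup_singleton a)
          (List.disjoint_singleton.mpr hmem)

-- zip lemmas used to commute each staged map past the zips
theorem zip_self_map {α β : Type} (xs : List α) (g : α → β) :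
    xs.zip (xs.map g) = xs.map (fun x => (x, g x)) := by
  induction xs with
  | nil => rfl
  | cons a l ih => simp [ih]

theorem zip_map_map {α β γ : Type} (xs : List α) (f : α → β) (g : α → γ) :
    (xs.map f).zip (xs.map g) = xs.map (fun x => (f x, g x)) := by
  induction xs with
  | nil => rfl
  | cons a l ih => simp [ih]

-- B's output, element-wise
set_option maxHeartbeats 8000000 in
theorem alt_eq_map (action_dict : List (Int × String)) (action_list : List Int) :
    create_short_labels_alt action_dict action_list
      = (PySem.List.dedup action_list).map
          (fun a => (a, pvStaged a (pvDesc action_dict a))) := by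
  unfold create_short_labels_alt pvStaged pvDesc
  simp only [pvResizeRev, pvColorRev, List.foldl_cons, List.foldl_nil,
    zip_self_map, zip_map_map, List.map_map, Function.comp]

-- ===== VERDICT (by name: the statement is the Claim_ definition above) =====
theorem create_short_labels_spec : Claim_equal_create_short_labels := by
  intro action_dict action_list _
  unfold Spec_create_short_labels create_short_labels
  rw [alt_eq_map]
  calc (action_list.foldl _ PySem.Dict.empty).items
      = (action_list.foldl (fun m a => m.insert a (pvChain a (pvDesc action_dict a))) PySem.Dict.empty).items := by
        congr 1
        apply PySem.List.foldl_congr_mem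
        intro m aid _
        exact chain_step m aid (pvDesc action_dict aid)
    _ = (action_list.foldl PySem.Set.add []).map (fun a => (a, pvChain a (pvDesc action_dict a))) :=
        fold_items_eq _ action_list [] PySem.Dict.empty (by simp [PySem.Dict.empty]) List.nodup_nil
    _ = (PySem.List.dedup action_list).map (fun a => (a, pvStaged a (pvDesc action_dict a))) := by
        rw [PySem.List.dedup_eq_ofList, PySem.Set.ofList_eq_foldl]
        exact List.map_congr_left (fun a _ => by rw [staged_eq_chain])
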